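-- pv_equiv track=rewrite | github.com/songzy12/CodeJam | codejam/2023/A/rainbow_sort.py | compute
-- ===== SOURCE A (Python) =====
-- def compute(S):
--     res = []
--     res_set = set()
--     for s in S:
--         if s not in res_set:
--             res_set.add(s)
--             res.append(s)
--         elif s == res[-1]:
--             continue
--         else:
--             return False, []
--     return True, res
-- ===== SOURCE B (Python) =====
-- def compute(S):
--     runs = []
--     for s in S:
--         if not runs or s != runs[-1]:
--             runs.append(s)
--     if len(runs) == len(set(runs)):
--         return True, runs
--     return False, []
-- ===== Notes on version B (the rewrite author's own statement) =====
-- stated objective: idiomatic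
-- what changed: A interleaves dedup bookkeeping (set + result list) with an early-exit validity check in one pass; B first condenses S into its run leaders in one simple pass, then validates globally by comparing len(runs) with len(set(runs)).
import Mathlib
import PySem

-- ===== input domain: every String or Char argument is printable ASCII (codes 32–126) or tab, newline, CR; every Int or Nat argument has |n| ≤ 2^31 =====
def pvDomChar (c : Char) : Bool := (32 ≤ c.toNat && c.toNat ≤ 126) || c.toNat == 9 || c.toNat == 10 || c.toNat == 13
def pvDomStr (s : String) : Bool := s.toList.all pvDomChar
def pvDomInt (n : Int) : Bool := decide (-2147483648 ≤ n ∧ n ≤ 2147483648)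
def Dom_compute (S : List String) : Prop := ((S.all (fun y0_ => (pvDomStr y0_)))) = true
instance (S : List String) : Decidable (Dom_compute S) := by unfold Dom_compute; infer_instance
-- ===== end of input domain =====

-- B replaces A's single pass (dedup set + early exit) by build-run-leaders-then-validate-globally (idiomatic, same cost).

-- ===== PORT A =====
-- the for-loop of A, carrying (res, res_set); early return = (false, [])
def computeAux : List String → List String → PySem.Set String → Bool × List String
  | [], res, _ => (true, res)
  | s :: rest, res, resSet =>
    if ¬ (PySem.Set.contains resSet s) then
      computeAux rest (res ++ [s]) (PySem.Set.add resSet s)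
    else if PySem.List.pyGet? res (-1) = some s then
      computeAux rest res resSet
    else (false, [])

def compute (S : List String) : Bool × List String :=
  computeAux S [] PySem.Set.empty

-- ===== PORT B =====
def compute_alt (S : List String) : Bool × List String :=
  let runs := S.foldl
    (fun runs s => if runs = [] ∨ PySem.List.pyGet? runs (-1) ≠ some s then runs ++ [s] else runs) []
  if runs.length = (PySem.Set.ofList runs).length then (true, runs) else (false, [])

-- ===== PRECONDITION & SPEC =====
def Spec_compute (S : List String) (out : Bool × List String) : Prop := out = compute_alt S
instance (S : List String) (out : Bool × List String) : Decidable (Spec_compute S out) := by unfold Spec_compute; infer_instance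

-- ===== CLAIM (what is proved, stated in full; the proofs are below) =====
def Claim_equal_compute : Prop := ∀ (S : List String), Dom_compute S → Spec_compute S (compute S)

-- ===== LEMMAS AND PROOFS =====

-- run leaders of a list, given the leader of the run currently in progress
def lead : Option String → List String → List String
  | _, [] => []
  | l, s :: t => if some s = l then lead l t else s :: lead (some s) t

theorem computeAux_eq (t : List String) : ∀ (res : List String), res.Nodup →
    computeAux t res res =
      (if (res ++ lead res.getLast? t).Nodup then (true, res ++ lead res.getLast? t)
       else (false, [])) := by
  induction t with
  | nil => intro res hnd; simp [computeAux, lead, hnd]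
  | cons s rest ih =>
    intro res hnd
    by_cases hmem : s ∈ res
    · by_cases hlast : res.getLast? = some s
      · have : computeAux (s :: rest) res res = computeAux rest res res := by
          simp [computeAux, hmem, PySem.List.pyGet?_neg_one, hlast]
        rw [this, ih res hnd]
        have hl : lead res.getLast? (s :: rest) = lead res.getLast? rest := by
          simp [lead, hlast]
        rw [hl]
      · have hA : computeAux (s :: rest) res res = (false, []) := by
          simp [computeAux, hmem, PySem.List.pyGet?_neg_one, hlast]
        have hl : lead res.getLast? (s :: rest) = s :: lead (some s) rest := by
          have : ¬ (some s = res.getLast?) := fun h => hlast h.symm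
          simp [lead, this]
        rw [hA, hl]
        have hnot : ¬ (res ++ s :: lead (some s) rest).Nodup := by
          intro h
          rcases (List.nodup_append).mp h with ⟨_, _, hdisj⟩
          exact hdisj s hmem s (List.mem_cons_self) rfl
        simp [hnot]
    · have hstep : computeAux (s :: rest) res res = computeAux rest (res ++ [s]) (res ++ [s]) := by
        simp [computeAux, hmem]
      have hnd' : (res ++ [s]).Nodup := by
        simp [List.nodup_append, hnd]
        exact fun a ha h => hmem (h ▸ ha)
      rw [hstep, ih (res ++ [s]) hnd']
      have hlast' : (res ++ [s]).getLast? = some s := by simp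
      have hsl : some s ≠ res.getLast? := by
        intro h
        exact hmem (List.mem_of_getLast? h.symm)
      have hl : lead res.getLast? (s :: rest) = s :: lead (some s) rest := by
        simp [lead, hsl]
      rw [hlast', hl]
      simp

theorem foldl_runs_eq (t : List String) : ∀ (acc : List String),
    t.foldl (fun runs s => if runs = [] ∨ PySem.List.pyGet? runs (-1) ≠ some s
                           then runs ++ [s] else runs) acc
      = acc ++ lead acc.getLast? t := by
  induction t with
  | nil => intro acc; simp [lead]
  | cons s rest ih =>
    intro acc
    by_cases hlast : acc.getLast? = some s
    · have hne : acc ≠ [] := by rintro rfl; simp at hlast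
      have hcond : ¬ (acc = [] ∨ PySem.List.pyGet? acc (-1) ≠ some s) := by
        simp [PySem.List.pyGet?_neg_one, hlast, hne]
      simp only [List.foldl_cons, if_neg hcond]
      rw [ih acc]
      have hl : lead acc.getLast? (s :: rest) = lead acc.getLast? rest := by
        simp [lead, hlast]
      rw [hl]
    · have hcond : (acc = [] ∨ PySem.List.pyGet? acc (-1) ≠ some s) := by
        right; simp [PySem.List.pyGet?_neg_one]; exact fun h => hlast h
      simp only [List.foldl_cons, if_pos hcond]
      rw [ih (acc ++ [s])]
      have hsl : some s ≠ acc.getLast? := fun h => hlast h.symm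
      have hl : lead acc.getLast? (s :: rest) = s :: lead (some s) rest := by
        simp [lead, hsl]
      rw [hl]
      simp

theorem length_ofList_eq_iff (xs : List String) :
    xs.length = (PySem.Set.ofList xs).length ↔ xs.Nodup := by
  induction xs using List.reverseRecOn with
  | nil => simp
  | append_singleton ys y ih =>
    rw [PySem.Set.ofList_append_singleton, PySem.Set.add_eq_ite]
    by_cases hy : y ∈ PySem.Set.ofList ys
    · have hy' : y ∈ ys := (PySem.Set.mem_ofList ys y).mp hy
      have hle := PySem.Set.length_ofList_le (xs := ys)
      constructor
      · intro h; rw [if_pos hy] at h; simp at h; omega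
      · intro h
        rcases (List.nodup_append).mp h with ⟨_, _, hdisj⟩
        exact absurd (hdisj y hy' y (List.mem_cons_self) rfl) (by simp)
    · have hy' : y ∉ ys := fun h => hy ((PySem.Set.mem_ofList ys y).mpr h)
      rw [if_neg hy]
      simp only [List.length_append, List.length_cons, List.length_nil]
      constructor
      · intro h
        have : ys.Nodup := ih.mp (by omega)
        simp [List.nodup_append, this]
        exact fun a ha h => hy' (h ▸ ha)
      · intro h
        rcases (List.nodup_append).mp h with ⟨h1, _, _⟩
        have := ih.mpr h1
        omega

-- ===== VERDICT (by name: the statement is the Claim_ definition above) =====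
theorem compute_spec : Claim_equal_compute := by
  intro S _
  unfold Spec_compute compute compute_alt
  have hA := computeAux_eq S [] (List.nodup_nil)
  simp only [List.nil_append, List.getLast?_nil] at hA
  have hE : (PySem.Set.empty : PySem.Set String) = [] := rfl
  rw [hE]
  have hB := foldl_runs_eq S []
  simp only [List.nil_append, List.getLast?_nil] at hB
  rw [hA]
  simp only [hB]
  by_cases h : (lead none S).Nodup
  · rw [if_pos h, if_pos ((length_ofList_eq_iff _).mpr h)]
  · rw [if_neg h, if_neg (fun hc => h ((length_ofList_eq_iff _).mp hc))]
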